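-- pv_equiv track=rewrite | github.com/Pyk017/Competetive-Programming | Strange_Numbers.py | strange
-- ===== SOURCE A (Python) =====
-- def strange(la, r):
--     array = []
--     result = 0
--     for i in range(la, r+1):
--         if len(str(i)) == 1:
--             array.append(i)
--             result += 1
--         else:
--             if i % len(str(i)) == 0:
--                 a = i // len(str(i))
--                 if a in array or len(str(a)) == 1:
--                     result += 1
--
--                 array.append(i)
--
--     return result
-- ===== SOURCE B (Python) =====
-- def strange(la, r):
--     # Stateless re-implementation: no growing `array`; each i is tested
--     # by a pure predicate (membership in A's array is characterised as
--     # "la <= a < i and a would have been appended").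
--     def appended(x):
--         L = len(str(x))
--         return L == 1 or x % L == 0
--
--     def counts(i):
--         L = len(str(i))
--         if L == 1:
--             return True
--         if i % L != 0:
--             return False
--         a = i // L
--         return len(str(a)) == 1 or (la <= a < i and appended(a))
--
--     total = 0
--     for i in range(la, r + 1):
--         if counts(i):
--             total += 1
--     return total
-- ===== Notes on version B (the rewrite author's own statement) =====
-- stated objective: alternative
-- what changed: The growing `array` and its membership scan are removed: each i is tested by a pure closed-form predicate (membership in A's list is characterised as la <= a < i and a itself single-digit or divisible by its digit count), so the loop carries no state but the counter.
import Mathlib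
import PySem

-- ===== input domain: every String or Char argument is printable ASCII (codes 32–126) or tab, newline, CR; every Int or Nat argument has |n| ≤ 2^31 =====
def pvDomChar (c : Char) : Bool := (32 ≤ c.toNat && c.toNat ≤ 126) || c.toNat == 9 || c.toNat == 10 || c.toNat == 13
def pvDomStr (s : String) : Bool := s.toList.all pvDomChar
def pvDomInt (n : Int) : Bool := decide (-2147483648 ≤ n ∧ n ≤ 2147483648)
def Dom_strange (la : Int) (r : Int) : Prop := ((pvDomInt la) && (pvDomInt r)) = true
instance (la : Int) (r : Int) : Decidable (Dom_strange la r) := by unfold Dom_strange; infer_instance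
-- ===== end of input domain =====

-- B removes A's growing `array` and its membership scan, testing each i with a
-- pure stateless predicate instead (alternative decomposition, same results).


-- len(str(i)) (shared helper: both Pythons write this same expression)
def pyLen (i : Int) : Int := PySem.Str.len (PySem.Int.toStr i)

-- ===== PORT A =====
-- one iteration of A's for-loop body over the state (array, result)
def strangeStep (st : List Int × Int) (i : Int) : List Int × Int :=
  if pyLen i == 1 then (st.1 ++ [i], st.2 + 1)
  else if PySem.Int.mod i (pyLen i) == 0 then
    let a := PySem.Int.floordiv i (pyLen i)
    if st.1.contains a || pyLen a == 1 then (st.1 ++ [i], st.2 + 1)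
    else (st.1 ++ [i], st.2)
  else st

def strange (la : Int) (r : Int) : Int :=
  ((PySem.List.pyRange la (r + 1) 1).foldl strangeStep ([], 0)).2

-- ===== PORT B =====
-- B's helper appended(x)
def pyAppended (x : Int) : Bool :=
  pyLen x == 1 || PySem.Int.mod x (pyLen x) == 0

-- B's helper counts(i) (closes over la)
def pyCounts (la : Int) (i : Int) : Bool :=
  if pyLen i == 1 then true
  else if PySem.Int.mod i (pyLen i) != 0 then false
  else
    let a := PySem.Int.floordiv i (pyLen i)
    pyLen a == 1 || (decide (la ≤ a) && decide (a < i) && pyAppended a)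

def strange_alt (la : Int) (r : Int) : Int :=
  (PySem.List.pyRange la (r + 1) 1).foldl
    (fun total i => if pyCounts la i then total + 1 else total) 0

-- ===== PRECONDITION & SPEC =====
def Spec_strange (la : Int) (r : Int) (out : Int) : Prop := out = strange_alt la r
instance (la : Int) (r : Int) (out : Int) : Decidable (Spec_strange la r out) := by unfold Spec_strange; infer_instance

-- ===== CLAIM (what is proved, stated in full; the proofs are below) =====
def Claim_equal_strange : Prop := ∀ (la : Int) (r : Int), Dom_strange la r → Spec_strange la r (strange la r)

-- ===== LEMMAS AND PROOFS =====

-- an element is appended by A's loop body iff pyAppended holds of it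
lemma mem_filter_appended (la b a : Int) :
    ((PySem.List.pyRange la b 1).filter pyAppended).contains a =
      (decide (la ≤ a) && decide (a < b) && pyAppended a) := by
  rcases h : pyAppended a with _ | _
  · simp [List.mem_filter, h, PySem.List.mem_pyRange_one]
  · simp [List.mem_filter, h, PySem.List.mem_pyRange_one]

-- loop invariant: after processing range [la, m), A's array is the pyAppended-filter
-- of that range and A's result is B's count over it
lemma strange_invariant (la : Int) : ∀ (m : Int),
    (PySem.List.pyRange la m 1).foldl strangeStep ([], 0) =
      ((PySem.List.pyRange la m 1).filter pyAppended,
       (PySem.List.pyRange la m 1).foldl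
         (fun total i => if pyCounts la i then total + 1 else total) 0) := by
  have key : ∀ (n : Nat) (m : Int), m - la = (n : Int) →
      (PySem.List.pyRange la m 1).foldl strangeStep ([], 0) =
        ((PySem.List.pyRange la m 1).filter pyAppended,
         (PySem.List.pyRange la m 1).foldl
           (fun total i => if pyCounts la i then total + 1 else total) 0) := by
    intro n
    induction n with
    | zero =>
      intro m hm
      rw [PySem.List.pyRange_one_eq_nil (by omega)]
      simp
    | succ k ih =>
      intro m hm
      have hsplit : PySem.List.pyRange la m 1 =
          PySem.List.pyRange la (m - 1) 1 ++ [m - 1] := by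
        have := PySem.List.pyRange_one_succ_right (a := la) (b := m - 1) (by omega)
        simpa using this
      rw [hsplit, List.foldl_append, List.foldl_append, List.filter_append,
        ih (m - 1) (by omega)]
      clear ih
      set i := m - 1 with hi
      simp only [List.foldl_cons, List.foldl_nil, List.filter_cons, List.filter_nil]
      unfold strangeStep pyCounts
      dsimp only
      by_cases h1 : pyLen i == 1
      · simp [h1, pyAppended]
      · by_cases h2 : PySem.Int.mod i (pyLen i) == 0
        · have hmem := mem_filter_appended la i (PySem.Int.floordiv i (pyLen i))
          have happ : pyAppended i = true := by
            simp [pyAppended]; right; simpa using h2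
          have hc : ((List.filter pyAppended (PySem.List.pyRange la i)).contains
                (PySem.Int.floordiv i (pyLen i)) || (pyLen (PySem.Int.floordiv i (pyLen i)) == 1))
              = (pyLen (PySem.Int.floordiv i (pyLen i)) == 1 ||
                 (decide (la ≤ PySem.Int.floordiv i (pyLen i)) &&
                  decide (PySem.Int.floordiv i (pyLen i) < i) &&
                  pyAppended (PySem.Int.floordiv i (pyLen i)))) := by
            rw [hmem, Bool.or_comm]
          rw [hc]
          have h2b : (PySem.Int.mod i (pyLen i) != 0) = false := by
            simp [bne]; simpa using h2
          simp only [h1, h2, h2b, happ, Bool.false_eq_true, ite_false, ite_true]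
          split_ifs <;> rfl
        · have happ : pyAppended i = false := by
            simp [pyAppended]
            constructor
            · simpa using h1
            · simpa using h2
          have h2' : PySem.Int.mod i (pyLen i) ≠ 0 := by
            simpa using h2
          simp [h1, h2', happ, bne]
  intro m
  by_cases h : la ≤ m
  · exact key (m - la).toNat m (by omega)
  · rw [PySem.List.pyRange_one_eq_nil (by omega)]
    simp

-- ===== VERDICT (by name: the statement is the Claim_ definition above) =====
theorem strange_spec : Claim_equal_strange := by
  intro la r _
  unfold Spec_strange strange strange_alt
  rw [strange_invariant la (r + 1)]
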